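-- pv_equiv track=rewrite | github.com/HuberTRoy/leetCode | String/DetectCapital.py | letter_all_capital_or_lower
-- ===== SOURCE A (Python) =====
-- def letter_all_capital_or_lower(word):
--     #
--     lower = False
--     capital = False
--
--     # A-Z
--     left = 65
--     right = 90
--
--     if 97 <= ord(word[0]) <= 122:
--         left = 97
--         right = 122
--
--     for i in word:
--         if not left <= ord(i) <= right:
--             return False
--     return True
-- ===== SOURCE B (Python) =====
-- def letter_all_capital_or_lower(word):
--     return all('a' <= c <= 'z' for c in word) or all('A' <= c <= 'Z' for c in word)
-- ===== Notes on version B (the rewrite author's own statement) =====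
-- stated objective: simpler
-- what changed: B drops A's first-character range selection and mutable bounds entirely and states the property directly as a disjunction of two whole-string tests: all characters are lowercase letters, or all are uppercase letters.
import Mathlib
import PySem

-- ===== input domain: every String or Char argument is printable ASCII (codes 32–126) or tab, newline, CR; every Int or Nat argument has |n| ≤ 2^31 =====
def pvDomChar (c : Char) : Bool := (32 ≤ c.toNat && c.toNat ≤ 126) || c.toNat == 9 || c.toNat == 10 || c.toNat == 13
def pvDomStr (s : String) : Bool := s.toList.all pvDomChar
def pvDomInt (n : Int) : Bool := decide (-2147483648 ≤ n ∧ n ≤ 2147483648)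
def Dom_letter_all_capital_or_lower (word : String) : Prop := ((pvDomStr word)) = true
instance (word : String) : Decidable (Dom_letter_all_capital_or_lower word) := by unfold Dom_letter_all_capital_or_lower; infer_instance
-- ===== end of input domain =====

-- B replaces A's first-char range selection + early-exit loop by a disjunction of two whole-string tests (all lowercase letters OR all uppercase letters); equivalence on nonempty strings (A raises IndexError on "").


-- ===== PORT A =====
-- A's for-loop with early `return False`
def pvALoop (left right : Int) : List Char → Bool
  | [] => true
  | c :: cs => if left ≤ (c.toNat : Int) ∧ (c.toNat : Int) ≤ right then pvALoop left right cs else false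

def letter_all_capital_or_lower (word : String) : Bool :=
  match word.toList with
  | [] => false  -- unreachable under Pre_: Python raises IndexError on word[0]
  | c0 :: _ =>
    let cond := 97 ≤ (c0.toNat : Int) ∧ (c0.toNat : Int) ≤ 122
    let left : Int := if cond then 97 else 65
    let right : Int := if cond then 122 else 90
    pvALoop left right word.toList

-- ===== PORT B =====
def letter_all_capital_or_lower_alt (word : String) : Bool :=
  (word.toList.all fun c => 'a' ≤ c && c ≤ 'z') || (word.toList.all fun c => 'A' ≤ c && c ≤ 'Z')

-- ===== PRECONDITION & SPEC =====
-- Pre_ excludes only the empty string, where A raises IndexError on word[0].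
def Pre_letter_all_capital_or_lower (word : String) : Prop := word ≠ ""
instance (word : String) : Decidable (Pre_letter_all_capital_or_lower word) := by unfold Pre_letter_all_capital_or_lower; infer_instance
def pvWitness_letter_all_capital_or_lower : String := "Google"

def Spec_letter_all_capital_or_lower (word : String) (out : Bool) : Prop := out = letter_all_capital_or_lower_alt word
instance (word : String) (out : Bool) : Decidable (Spec_letter_all_capital_or_lower word out) := by unfold Spec_letter_all_capital_or_lower; infer_instance

-- ===== CLAIM (what is proved, stated in full; the proofs are below) =====
def Claim_equal_letter_all_capital_or_lower : Prop := ∀ (word : String), Dom_letter_all_capital_or_lower word → Pre_letter_all_capital_or_lower word → Spec_letter_all_capital_or_lower word (letter_all_capital_or_lower word)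

-- ===== LEMMAS AND PROOFS =====

-- A's early-exit loop is the all-in-range test.
theorem pvALoop_eq_all (l r : Int) (cs : List Char) :
    pvALoop l r cs = cs.all (fun c => decide (l ≤ (c.toNat : Int) ∧ (c.toNat : Int) ≤ r)) := by
  induction cs with
  | nil => rfl
  | cons c cs ih =>
    simp only [pvALoop, List.all_cons, ih]
    by_cases h : l ≤ (c.toNat : Int) ∧ (c.toNat : Int) ≤ r <;> simp [h]

theorem pvCharLe (c d : Char) : (c ≤ d) ↔ (c.toNat : Int) ≤ (d.toNat : Int) := by
  constructor
  · intro h; exact_mod_cast Nat.le_of_lt_succ (Nat.lt_succ_of_le h)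
  · intro h; exact_mod_cast h

theorem pvRangePt (l r : Int) (a b : Char) (ha : (a.toNat : Int) = l) (hb : (b.toNat : Int) = r)
    (c : Char) : decide (l ≤ (c.toNat : Int) ∧ (c.toNat : Int) ≤ r) = (a ≤ c && c ≤ b) := by
  rw [Bool.eq_iff_iff]
  simp only [decide_eq_true_eq, Bool.and_eq_true, pvCharLe]
  rw [ha, hb]

theorem pvAllRange (l r : Int) (a b : Char) (ha : (a.toNat : Int) = l) (hb : (b.toNat : Int) = r)
    (cs : List Char) :
    cs.all (fun c => decide (l ≤ (c.toNat : Int) ∧ (c.toNat : Int) ≤ r))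
      = cs.all (fun c => a ≤ c && c ≤ b) := by
  induction cs with
  | nil => rfl
  | cons c cs ih => rw [List.all_cons, List.all_cons, ih, pvRangePt l r a b ha hb c]

-- ===== VERDICT (by name: the statement is the Claim_ definition above) =====
theorem letter_all_capital_or_lower_spec : Claim_equal_letter_all_capital_or_lower := by
  intro word _ hpre
  unfold Spec_letter_all_capital_or_lower letter_all_capital_or_lower letter_all_capital_or_lower_alt
  cases hw : word.toList with
  | nil =>
    exfalso; apply hpre; rw [← String.ofList_toList (s := word), hw]
  | cons c0 rest =>
    simp only [pvALoop_eq_all]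
    by_cases h : 97 ≤ (c0.toNat : Int) ∧ (c0.toNat : Int) ≤ 122
    · -- first char lowercase: A tests 97..122; B's uppercase clause fails at c0
      rw [if_pos h, if_pos h, pvAllRange 97 122 'a' 'z' (by decide) (by decide)]
      have hup : ('A' ≤ c0 && c0 ≤ 'Z') = false := by
        rw [← pvRangePt 65 90 'A' 'Z' (by decide) (by decide) c0]
        simp only [decide_eq_false_iff_not]
        omega
      rw [show ((c0 :: rest).all fun c => 'A' ≤ c && c ≤ 'Z') = false from by
            rw [List.all_cons, hup, Bool.false_and],
          Bool.or_false]
    · -- first char not lowercase: A tests 65..90; B's lowercase clause fails at c0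
      rw [if_neg h, if_neg h, pvAllRange 65 90 'A' 'Z' (by decide) (by decide)]
      have hlo : ('a' ≤ c0 && c0 ≤ 'z') = false := by
        rw [← pvRangePt 97 122 'a' 'z' (by decide) (by decide) c0]
        simp only [decide_eq_false_iff_not]
        exact h
      rw [show ((c0 :: rest).all fun c => 'a' ≤ c && c ≤ 'z') = false from by
            rw [List.all_cons, hlo, Bool.false_and],
          Bool.false_or]
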